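-- pv_equiv track=rewrite | github.com/icpmacdo/inference-workload-bench | chatbot/tinker_chat_gui.py | _collect_cli_overrides
-- ===== SOURCE A (Python) =====
-- def _collect_cli_overrides(argv: list[str]) -> set[str]:
--     option_map = {
--         "--base-model": "base_model",
--         "--model-path": "model_path",
--         "--base-url": "base_url",
--         "--renderer": "renderer_name",
--         "--max-tokens": "max_tokens",
--         "--temperature": "temperature",
--         "--top-p": "top_p",
--         "--top-k": "top_k",
--         "--seed": "seed",
--         "--system-prompt": "system_prompt",
--         "--no-restore-state": "no_restore_state",
--     }
--     overrides: set[str] = set()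
--     for token in argv:
--         if token in option_map:
--             overrides.add(option_map[token])
--             continue
--         for option, name in option_map.items():
--             if token.startswith(f"{option}="):
--                 overrides.add(name)
--                 break
--     return overrides
-- ===== SOURCE B (Python) =====
-- def _collect_cli_overrides(argv: list[str]) -> set[str]:
--     option_map = {
--         "--base-model": "base_model",
--         "--model-path": "model_path",
--         "--base-url": "base_url",
--         "--renderer": "renderer_name",
--         "--max-tokens": "max_tokens",
--         "--temperature": "temperature",
--         "--top-p": "top_p",
--         "--top-k": "top_k",
--         "--seed": "seed",
--         "--system-prompt": "system_prompt",
--         "--no-restore-state": "no_restore_state",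
--     }
--     overrides: set[str] = set()
--     for token in argv:
--         prefix = token.split("=", 1)[0]
--         if prefix in option_map:
--             overrides.add(option_map[prefix])
--     return overrides
-- ===== Notes on version B (the rewrite author's own statement) =====
-- stated objective: simpler
-- what changed: B computes each token's key once as token.split('=',1)[0] and does a single dict lookup, removing A's nested linear scan over option_map that tests startswith for every option.
import Mathlib
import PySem

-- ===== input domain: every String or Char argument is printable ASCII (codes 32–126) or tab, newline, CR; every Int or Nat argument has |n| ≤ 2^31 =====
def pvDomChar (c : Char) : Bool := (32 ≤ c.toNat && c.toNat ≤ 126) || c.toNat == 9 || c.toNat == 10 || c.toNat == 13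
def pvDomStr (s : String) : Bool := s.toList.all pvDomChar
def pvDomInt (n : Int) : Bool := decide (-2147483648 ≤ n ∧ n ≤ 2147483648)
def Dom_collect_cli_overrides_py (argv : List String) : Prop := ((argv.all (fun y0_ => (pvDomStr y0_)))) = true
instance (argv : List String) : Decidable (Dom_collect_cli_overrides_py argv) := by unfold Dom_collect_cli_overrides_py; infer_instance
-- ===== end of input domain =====

-- B computes each token's key once as token.split('=',1)[0] and does one dict lookup,
-- removing A's inner linear scan over option_map; objective: simpler.

-- ===== PORT A =====
-- the literal option_map of the Python source (shared constant of both programs)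
def pvOptionMap : PySem.Dict String String := ⟨[
  ("--base-model", "base_model"),
  ("--model-path", "model_path"),
  ("--base-url", "base_url"),
  ("--renderer", "renderer_name"),
  ("--max-tokens", "max_tokens"),
  ("--temperature", "temperature"),
  ("--top-p", "top_p"),
  ("--top-k", "top_k"),
  ("--seed", "seed"),
  ("--system-prompt", "system_prompt"),
  ("--no-restore-state", "no_restore_state")]⟩

-- inner 'for option, name in option_map.items(): if token.startswith(option+"="): add; break'
def pvScanA (token : String) (overrides : PySem.Set String) : List (String × String) → PySem.Set String
  | [] => overrides
  | (option, name) :: rest =>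
    if PySem.Str.startswith token (option ++ "=") then PySem.Set.add overrides name
    else pvScanA token overrides rest

def pvStepA (overrides : PySem.Set String) (token : String) : PySem.Set String :=
  if pvOptionMap.contains token then PySem.Set.add overrides (pvOptionMap.getD token "")
  else pvScanA token overrides pvOptionMap.items

def collect_cli_overrides_py (argv : List String) : List String :=
  argv.foldl pvStepA PySem.Set.empty

-- ===== PORT B =====
-- prefix = token.split("=", 1)[0]; the split list is always nonempty (sep ≠ ""),
-- so the fallback branch is unreachable
def pvPrefixB (token : String) : String :=
  match PySem.Str.splitMax? token "=" 1 with
  | some (p :: _) => p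
  | _ => token

def pvStepB (overrides : PySem.Set String) (token : String) : PySem.Set String :=
  let pre := pvPrefixB token
  if pvOptionMap.contains pre then PySem.Set.add overrides (pvOptionMap.getD pre "")
  else overrides

def collect_cli_overrides_py_alt (argv : List String) : List String :=
  argv.foldl pvStepB PySem.Set.empty

-- ===== PRECONDITION & SPEC =====
def Spec_collect_cli_overrides_py (argv : List String) (out : List String) : Prop := out = collect_cli_overrides_py_alt argv
instance (argv : List String) (out : List String) : Decidable (Spec_collect_cli_overrides_py argv out) := by unfold Spec_collect_cli_overrides_py; infer_instance

-- ===== CLAIM (what is proved, stated in full; the proofs are below) =====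
def Claim_equal_collect_cli_overrides_py : Prop := ∀ (argv : List String), Dom_collect_cli_overrides_py argv → Spec_collect_cli_overrides_py argv (collect_cli_overrides_py argv)

-- ===== LEMMAS AND PROOFS =====

-- the prefix of a char list before the first '='
def pvTW (cs : List Char) : List Char := cs.takeWhile (fun c => c != '=')

theorem pvTW_nil : pvTW [] = [] := rfl

theorem pvTW_cons_eq (l : List Char) : pvTW ('=' :: l) = [] := by
  simp [pvTW]

theorem pvTW_cons_ne (c : Char) (l : List Char) (h : ¬ c = '=') :
    pvTW (c :: l) = c :: pvTW l := by
  simp [pvTW, h]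

theorem pvTW_eq_self (cs : List Char) (h : '=' ∉ cs) : pvTW cs = cs := by
  induction cs with
  | nil => rfl
  | cons c l ih =>
    simp only [List.mem_cons, not_or] at h
    rw [pvTW_cons_ne c l (fun hc => h.1 hc.symm), ih h.2]

-- head of splitOnMax.go once maxsplit is exhausted: the first finished piece survives
theorem pv_go0_head (fuel : Nat) (l cur r : List Char) :
    (PySem.Chars.splitOnMax.go ['='] fuel 0 l cur [r]).head? = some r := by
  cases fuel with
  | zero => simp [PySem.Chars.splitOnMax.go]
  | succ n => cases l <;> simp [PySem.Chars.splitOnMax.go]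

-- head of splitOnMax.go with maxsplit 1: everything before the first '='
theorem pv_go1_head (fuel : Nat) (l cur : List Char) (h : l.length < fuel) :
    (PySem.Chars.splitOnMax.go ['='] fuel 1 l cur []).head? =
      some (cur.reverse ++ pvTW l) := by
  induction fuel generalizing l cur with
  | zero => omega
  | succ n ih =>
    cases l with
    | nil => simp [PySem.Chars.splitOnMax.go, pvTW_nil]
    | cons c rest =>
      by_cases hc : c = '='
      · subst hc
        simp [PySem.Chars.splitOnMax.go, List.isPrefixOf, pv_go0_head, pvTW_cons_eq]
      · have hpre : List.isPrefixOf ['='] (c :: rest) = false := by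
          simp [List.isPrefixOf]
          intro h'; exact absurd h'.symm hc
        have hlen : rest.length < n := by simpa using h
        rw [pvTW_cons_ne c rest hc]
        simp [PySem.Chars.splitOnMax.go, hpre, ih rest (c :: cur) hlen]

theorem pv_prefixB_eq (token : String) :
    pvPrefixB token = String.ofList (pvTW token.toList) := by
  have hsep : ("=" : String).toList = ['='] := by decide
  have hhead : (PySem.Chars.splitOnMax token.toList ['='] 1).head? =
      some (pvTW token.toList) := by
    unfold PySem.Chars.splitOnMax
    simp only [show ¬((1:Int) < 0) by decide, if_false]
    simpa using pv_go1_head (token.toList.length + 1) token.toList [] (by omega)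
  unfold pvPrefixB PySem.Str.splitMax? PySem.Chars.splitMax?
  rw [hsep]
  simp only [List.isEmpty_cons]
  cases hL : PySem.Chars.splitOnMax token.toList ['='] 1 with
  | nil => rw [hL] at hhead; simp at hhead
  | cons p ps =>
    rw [hL] at hhead
    simp at hhead
    simp [hhead]

-- a startswith test against "option=" forces '=' into the token
theorem pv_startswith_mem (tok k : String)
    (h : PySem.Str.startswith tok (k ++ "=") = true) : '=' ∈ tok.toList := by
  rw [PySem.Str.startswith_eq] at h
  rw [PySem.Chars.startswith_iff] at h
  obtain ⟨t, ht⟩ := h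
  rw [← ht]
  simp [String.toList_append, show ("=" : String).toList = ['='] by decide]

theorem pv_takeWhile_append_eq (a t : List Char) (ha : '=' ∉ a) :
    pvTW (a ++ '=' :: t) = a := by
  induction a with
  | nil => simp [pvTW_cons_eq]
  | cons c cs ih =>
    simp only [List.mem_cons, not_or] at ha
    rw [List.cons_append, pvTW_cons_ne c _ (fun hc => ha.1 hc.symm), ih ha.2]

theorem pv_decomp (cs : List Char) (h : '=' ∈ cs) :
    ∃ t, cs = pvTW cs ++ '=' :: t := by
  induction cs with
  | nil => simp at h
  | cons c rest ih =>
    by_cases hc : c = '='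
    · subst hc; exact ⟨rest, by rw [pvTW_cons_eq]; rfl⟩
    · have hr : '=' ∈ rest := by
        cases h with
        | head => exact absurd rfl hc
        | tail _ h' => exact h'
      obtain ⟨t, ht⟩ := ih hr
      refine ⟨t, ?_⟩
      rw [pvTW_cons_ne c rest hc, List.cons_append, ← ht]

-- for a key without '=' : token.startswith(key+"=") ↔ the prefix before '=' is the key
theorem pv_startswith_iff (tok k : String) (hk : '=' ∉ k.toList) (hmem : '=' ∈ tok.toList) :
    PySem.Str.startswith tok (k ++ "=") = true ↔ pvTW tok.toList = k.toList := by
  rw [PySem.Str.startswith_eq, PySem.Chars.startswith_iff]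
  have hsep : (k ++ "=").toList = k.toList ++ ['='] := by
    simp [String.toList_append, show ("=" : String).toList = ['='] by decide]
  rw [hsep]
  constructor
  · rintro ⟨t, ht⟩
    rw [← ht, List.append_assoc, List.singleton_append]
    exact pv_takeWhile_append_eq k.toList t hk
  · intro hpre
    obtain ⟨t, ht⟩ := pv_decomp tok.toList hmem
    refine ⟨t, ?_⟩
    rw [List.append_assoc, List.singleton_append, ← hpre, ← ht]

-- when the token has no '=', the inner scan of A never fires
theorem pv_scan_none (tok : String) (ov : PySem.Set String) (hmem : '=' ∉ tok.toList) :
    ∀ items : List (String × String), pvScanA tok ov items = ov := by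
  intro items
  induction items with
  | nil => rfl
  | cons p rest ih =>
    obtain ⟨k, n⟩ := p
    have hsw : PySem.Str.startswith tok (k ++ "=") = false := by
      by_contra h
      exact hmem (pv_startswith_mem tok k (by simpa using h))
    have hstep : pvScanA tok ov ((k, n) :: rest) =
        if PySem.Str.startswith tok (k ++ "=") = true then PySem.Set.add ov n
        else pvScanA tok ov rest := rfl
    rw [hstep, hsw, if_neg (by simp), ih]

-- when the token contains '=', A's inner scan is B's single lookup of the prefix
theorem pv_scan_eq (tok : String) (ov : PySem.Set String) (hmem : '=' ∈ tok.toList) :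
    ∀ items : List (String × String), (∀ p ∈ items, '=' ∉ p.1.toList) →
      pvScanA tok ov items =
        (if items.any (fun p => p.1 == String.ofList (pvTW tok.toList)) then
          PySem.Set.add ov (((items.find? (fun p => p.1 == String.ofList (pvTW tok.toList))).map Prod.snd).getD "")
        else ov) := by
  intro items
  induction items with
  | nil => intro _; rfl
  | cons p rest ih =>
    intro hkeys
    obtain ⟨k, n⟩ := p
    have hk : '=' ∉ k.toList := hkeys (k, n) (by simp)
    have hiff := pv_startswith_iff tok k hk hmem
    have hstep : pvScanA tok ov ((k, n) :: rest) =
        if PySem.Str.startswith tok (k ++ "=") = true then PySem.Set.add ov n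
        else pvScanA tok ov rest := rfl
    by_cases hkey : (k == String.ofList (pvTW tok.toList)) = true
    · have hkeq : pvTW tok.toList = k.toList := by
        have : k = String.ofList (pvTW tok.toList) := by simpa using hkey
        rw [this]; simp [String.toList_ofList]
      have hsw : PySem.Str.startswith tok (k ++ "=") = true := hiff.mpr hkeq
      rw [hstep, hsw, if_pos rfl]
      rw [if_pos (by rw [List.any_cons, hkey, Bool.true_or])]
      rw [List.find?_cons_of_pos (by exact hkey)]
      rfl
    · have hsw : PySem.Str.startswith tok (k ++ "=") = false := by
        by_contra h
        have heq := hiff.mp (by simpa using h)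
        exact hkey (by rw [beq_iff_eq, heq, String.ofList_toList])
      rw [hstep, hsw, if_neg (by simp)]
      rw [ih (fun q hq => hkeys q (List.mem_cons_of_mem _ hq))]
      rw [List.any_cons, Bool.eq_false_iff.mpr hkey, Bool.false_or]
      rw [List.find?_cons_of_neg (by exact hkey)]

theorem pv_step_eq (ov : PySem.Set String) (tok : String) :
    pvStepA ov tok = pvStepB ov tok := by
  have hkeys : ∀ p ∈ pvOptionMap.items, '=' ∉ p.1.toList := by decide
  by_cases hmem : '=' ∈ tok.toList
  · -- token contains '=': it equals no key, both reduce to the prefix lookup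
    have hcont : pvOptionMap.contains tok = false := by
      unfold PySem.Dict.contains
      rw [List.any_eq_false]
      rintro ⟨k, n⟩ hp
      simp only [beq_iff_eq]
      intro hEq
      exact hkeys (k, n) hp (by rw [hEq]; exact hmem)
    rw [pvStepA, hcont]
    simp only [Bool.false_eq_true, if_false]
    rw [pv_scan_eq tok ov hmem pvOptionMap.items hkeys]
    rw [pvStepB, pv_prefixB_eq]
    rfl
  · -- no '=': the prefix is the token itself and A's scan never fires
    have hpre : pvPrefixB tok = tok := by
      rw [pv_prefixB_eq, pvTW_eq_self tok.toList hmem, String.ofList_toList]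
    rw [pvStepA, pvStepB, hpre]
    by_cases hc : pvOptionMap.contains tok = true
    · simp [hc]
    · simp [hc, pv_scan_none tok ov hmem]

theorem pv_foldl_eq (argv : List String) (ov : PySem.Set String) :
    argv.foldl pvStepA ov = argv.foldl pvStepB ov := by
  induction argv generalizing ov with
  | nil => rfl
  | cons t rest ih => simp [List.foldl_cons, pv_step_eq, ih]

-- ===== VERDICT (by name: the statement is the Claim_ definition above) =====
theorem collect_cli_overrides_py_spec : Claim_equal_collect_cli_overrides_py := by
  intro argv _
  unfold Spec_collect_cli_overrides_py collect_cli_overrides_py collect_cli_overrides_py_alt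
  exact pv_foldl_eq argv PySem.Set.empty
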